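-- pv_equiv track=rewrite | github.com/alexpill/advent-of-code | 2024/5/print_queue.py | resolve_values
-- ===== SOURCE A (Python) =====
-- def resolve_values(is_after, updates):
--     valid = []
--     invalid = []
--     for update in updates:
--         processed = set()
--         for page in update:
--             if is_after[page] & processed:
--                 invalid.append(update)
--                 break
--             processed.add(page)
--         else:
--             valid.append(update)
--     return valid, invalid
-- ===== SOURCE B (Python) =====
-- def resolve_values(is_after, updates):
--     valid = []
--     invalid = []
--     for update in updates:
--         for j in range(len(update)):
--             targets = is_after[update[j]]
--             if any(update[i] in targets for i in range(j)):
--                 invalid.append(update)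
--                 break
--         else:
--             valid.append(update)
--     return valid, invalid
-- ===== Notes on version B (the rewrite author's own statement) =====
-- stated objective: alternative
-- what changed: B drops A's running 'processed' set and instead, for each position j, rescans the earlier pages with a nested index loop testing membership in is_after[update[j]], short-circuiting on the first violating position.
import Mathlib
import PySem

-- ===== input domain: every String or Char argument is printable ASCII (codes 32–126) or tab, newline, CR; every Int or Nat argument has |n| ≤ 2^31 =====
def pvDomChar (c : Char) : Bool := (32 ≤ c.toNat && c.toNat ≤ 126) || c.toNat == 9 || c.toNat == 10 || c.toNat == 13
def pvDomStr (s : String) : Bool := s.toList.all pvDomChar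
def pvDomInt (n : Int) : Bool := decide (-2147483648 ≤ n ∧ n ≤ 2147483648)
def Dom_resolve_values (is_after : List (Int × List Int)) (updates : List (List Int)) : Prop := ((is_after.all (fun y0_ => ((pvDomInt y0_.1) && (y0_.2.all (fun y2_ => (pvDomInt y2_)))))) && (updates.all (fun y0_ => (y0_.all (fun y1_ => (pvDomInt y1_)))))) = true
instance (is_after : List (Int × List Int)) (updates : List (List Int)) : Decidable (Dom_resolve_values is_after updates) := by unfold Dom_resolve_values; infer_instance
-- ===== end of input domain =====

-- B replaces A's running 'processed' set by a nested left-to-right pairwise scan over indices (objective: alternative, same cost).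
-- A's KeyError inputs (a page looked up before any violation that is not a key of is_after) are excluded by Pre_.

-- ===== PORT A =====
-- inner 'for page in update' loop: returns true iff the update is invalid (break taken)
def pvAInner (d : PySem.Dict Int (List Int)) : List Int → PySem.Set Int → Bool
  | [], _ => false
  | page :: rest, processed =>
    if PySem.Set.inter (PySem.Set.ofList (d.getD page [])) processed ≠ [] then true
    else pvAInner d rest (PySem.Set.add processed page)

def resolve_values (is_after : List (Int × List Int)) (updates : List (List Int)) : List (List Int) × List (List Int) :=
  let d := PySem.Dict.ofList is_after
  updates.foldl (fun acc update =>
    if pvAInner d update PySem.Set.empty then (acc.1, acc.2 ++ [update])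
    else (acc.1 ++ [update], acc.2)) ([], [])

-- ===== PORT B =====
-- inner 'for j in range(len(update))' loop of Source B, from index j; true iff invalid (break taken)
def pvBScan (d : PySem.Dict Int (List Int)) (u : List Int) (j : Nat) : Bool :=
  if h : j < u.length then
    let targets := d.getD (u[j]'h) []
    if (List.range j).any (fun i => decide (u.getD i 0 ∈ targets)) then true
    else pvBScan d u (j + 1)
  else false
termination_by u.length - j

def resolve_values_alt (is_after : List (Int × List Int)) (updates : List (List Int)) : List (List Int) × List (List Int) :=
  let d := PySem.Dict.ofList is_after
  updates.foldl (fun acc update =>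
    if pvBScan d update 0 then (acc.1, acc.2 ++ [update])
    else (acc.1 ++ [update], acc.2)) ([], [])

-- ===== PRECONDITION & SPEC =====
-- Pre_ excludes exactly the inputs on which Python A raises KeyError: some update has an
-- index j that the left-to-right scan reaches (every earlier page is a key and causes no
-- violation) whose page is not a key of is_after.
def Pre_resolve_values (is_after : List (Int × List Int)) (updates : List (List Int)) : Prop :=
  ∀ u ∈ updates, ∀ j (hj : j < u.length),
    (∀ i (hi : i < j),
       ((PySem.Dict.ofList is_after).get? (u[i]'(by omega))).isSome = true ∧
       ∀ k, k < i → u.getD k 0 ∉ (PySem.Dict.ofList is_after).getD (u[i]'(by omega)) []) →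
    ((PySem.Dict.ofList is_after).get? (u[j]'hj)).isSome = true

instance (is_after : List (Int × List Int)) (updates : List (List Int)) : Decidable (Pre_resolve_values is_after updates) := by
  unfold Pre_resolve_values; infer_instance

def pvWitness_resolve_values : (List (Int × List Int)) × List (List Int) :=
  ([(1, [2]), (2, [])], [[1, 2], [2, 1]])

def Spec_resolve_values (is_after : List (Int × List Int)) (updates : List (List Int)) (out : List (List Int) × List (List Int)) : Prop := out = resolve_values_alt is_after updates
instance (is_after : List (Int × List Int)) (updates : List (List Int)) (out : List (List Int) × List (List Int)) : Decidable (Spec_resolve_values is_after updates out) := by unfold Spec_resolve_values; infer_instance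

-- ===== CLAIM (what is proved, stated in full; the proofs are below) =====
def Claim_equal_resolve_values : Prop := ∀ (is_after : List (Int × List Int)) (updates : List (List Int)), Dom_resolve_values is_after updates → Pre_resolve_values is_after updates → Spec_resolve_values is_after updates (resolve_values is_after updates)

-- ===== LEMMAS AND PROOFS =====

-- the two inner loops agree: A's scan from the remaining suffix with processed = first j pages
-- equals B's index scan from j
lemma pvInner_eq (d : PySem.Dict Int (List Int)) (u : List Int) (j : Nat) :
    pvAInner d (u.drop j) (PySem.Set.ofList (u.take j)) = pvBScan d u j := by
  rw [pvBScan]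
  by_cases h : j < u.length
  · rw [dif_pos h]
    rw [List.drop_eq_getElem_cons h, pvAInner]
    have hcond : (PySem.Set.inter (PySem.Set.ofList (d.getD (u[j]'h) []))
        (PySem.Set.ofList (u.take j)) ≠ []) ↔
        ((List.range j).any (fun i => decide (u.getD i 0 ∈ d.getD (u[j]'h) [])) = true) := by
      rw [Ne, List.eq_nil_iff_forall_not_mem]
      push Not
      simp only [PySem.Set.mem_inter, PySem.Set.mem_ofList, List.any_eq_true, List.mem_range,
        decide_eq_true_eq]
      constructor
      · rintro ⟨x, hxt, hxtake⟩
        obtain ⟨i, hi, hix⟩ := (List.mem_take_iff_getElem).1 hxtake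
        refine ⟨i, by omega, ?_⟩
        rw [List.getD_eq_getElem u 0 (by omega), hix]
        exact hxt
      · rintro ⟨i, hij, hmem⟩
        have hil : i < u.length := by omega
        refine ⟨u[i], ?_, ?_⟩
        · rwa [List.getD_eq_getElem u 0 hil] at hmem
        · exact (List.mem_take_iff_getElem).2 ⟨i, by omega, rfl⟩
    by_cases hc : (List.range j).any (fun i => decide (u.getD i 0 ∈ d.getD (u[j]'h) [])) = true
    · rw [if_pos (hcond.2 hc), if_pos hc]
    · rw [if_neg (fun hne => hc (hcond.1 hne)), if_neg hc]
      have hstep : PySem.Set.add (PySem.Set.ofList (u.take j)) (u[j]'h) =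
          PySem.Set.ofList (u.take (j + 1)) := by
        rw [List.take_add_one, List.getElem?_eq_getElem h]
        simp only [Option.toList_some]
        rw [PySem.Set.ofList_append_singleton]
      rw [hstep]
      exact pvInner_eq d u (j + 1)
  · rw [dif_neg h]
    rw [List.drop_eq_nil_of_le (by omega), pvAInner]
termination_by u.length - j

theorem resolve_values_key (is_after : List (Int × List Int)) (updates : List (List Int)) :
    resolve_values is_after updates = resolve_values_alt is_after updates := by
  have h0 : ∀ update : List Int,
      pvAInner (PySem.Dict.ofList is_after) update PySem.Set.empty =
      pvBScan (PySem.Dict.ofList is_after) update 0 := by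
    intro update
    have hx := pvInner_eq (PySem.Dict.ofList is_after) update 0
    simpa using hx
  show List.foldl (fun acc update =>
      if pvAInner (PySem.Dict.ofList is_after) update PySem.Set.empty = true then
        (acc.1, acc.2 ++ [update]) else (acc.1 ++ [update], acc.2)) ([], []) updates =
    List.foldl (fun acc update =>
      if pvBScan (PySem.Dict.ofList is_after) update 0 = true then
        (acc.1, acc.2 ++ [update]) else (acc.1 ++ [update], acc.2)) ([], []) updates
  congr 1
  funext acc update
  rw [h0]

-- ===== VERDICT (by name: the statement is the Claim_ definition above) =====
theorem resolve_values_spec : Claim_equal_resolve_values := by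
  intro isa ups _ _
  unfold Spec_resolve_values
  exact resolve_values_key isa ups
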